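-- pv_equiv track=rewrite | github.com/OzU-NLP/MedSpecSearch | MedSpecSearch/DataLoader.py | cleanTextData
-- ===== SOURCE A (Python) =====
-- def cleanTextData(textList):
--     cleanTextList = []
--     for text in textList:
--         text = text.lower()
--
--         cleanText = ""
--
--         for word in text.split(" "):
--             cleanWord = ""
--             for char in word:
--                 if(ord(char)>96 and ord(char)<123):
--                     cleanWord += char
--
--             cleanText += cleanWord + " "
--
--         cleanTextList += [cleanText.strip()]
--
--     return cleanTextList
-- ===== SOURCE B (Python) =====
-- def cleanTextData(textList):
--     return ["".join(c for c in text.lower() if 'a' <= c <= 'z' or c == ' ').strip()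
--             for text in textList]
-- ===== Notes on version B (the rewrite author's own statement) =====
-- stated objective: simpler
-- what changed: Replaces A's nested split-into-words / per-word char filter / rejoin-with-trailing-space / strip decomposition with one flat character-filter pass (keep a-z and space) over the lowercased text followed by strip.
import Mathlib
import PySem

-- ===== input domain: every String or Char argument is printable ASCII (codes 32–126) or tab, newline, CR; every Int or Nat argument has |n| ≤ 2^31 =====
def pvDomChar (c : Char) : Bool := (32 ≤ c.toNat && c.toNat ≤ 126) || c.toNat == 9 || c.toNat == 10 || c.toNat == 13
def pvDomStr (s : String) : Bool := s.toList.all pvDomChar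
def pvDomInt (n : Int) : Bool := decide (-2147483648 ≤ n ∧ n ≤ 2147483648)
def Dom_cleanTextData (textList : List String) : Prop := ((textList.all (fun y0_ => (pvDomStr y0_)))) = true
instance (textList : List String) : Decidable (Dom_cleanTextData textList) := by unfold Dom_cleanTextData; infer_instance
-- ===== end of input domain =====

-- B replaces A's split-words / per-word char filter / rejoin / strip decomposition with one
-- flat character-filter pass (keep 'a'..'z' and ' ') over the lowercased text, then strip.

-- ===== PORT A =====
-- inner loop: for char in word: if ord in (96,123): cleanWord += char
def pvCleanWordA (word : List Char) : List Char :=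
  word.foldl (fun cw c => if 96 < c.toNat ∧ c.toNat < 123 then cw ++ [c] else cw) []

-- one iteration of the outer 'for text in textList' body
def pvCleanTextA (text : String) : String :=
  let t := PySem.Chars.lower text.toList
  let cleanText :=
    (PySem.Chars.splitOn t [' ']).foldl (fun acc w => acc ++ (pvCleanWordA w ++ [' '])) []
  String.ofList (PySem.Chars.strip cleanText)

def cleanTextData (textList : List String) : List String :=
  textList.foldl (fun acc text => acc ++ [pvCleanTextA text]) []

-- ===== PORT B =====
def pvKeepB (c : Char) : Bool := (97 ≤ c.toNat && c.toNat ≤ 122) || c == ' '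

def cleanTextData_alt (textList : List String) : List String :=
  textList.map (fun text =>
    String.ofList (PySem.Chars.strip ((PySem.Chars.lower text.toList).filter pvKeepB)))

-- ===== PRECONDITION & SPEC =====
def Spec_cleanTextData (textList : List String) (out : List String) : Prop := out = cleanTextData_alt textList
instance (textList : List String) (out : List String) : Decidable (Spec_cleanTextData textList out) := by unfold Spec_cleanTextData; infer_instance

-- ===== CLAIM (what is proved, stated in full; the proofs are below) =====
def Claim_equal_cleanTextData : Prop := ∀ (textList : List String), Dom_cleanTextData textList → Spec_cleanTextData textList (cleanTextData textList)

-- ===== LEMMAS AND PROOFS =====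

-- A's word filter keeps exactly the lowercase letters
theorem pvCleanWordA_eq_filter (w : List Char) :
    pvCleanWordA w = w.filter (fun c => decide (96 < c.toNat ∧ c.toNat < 123)) := by
  simpa [pvCleanWordA] using
    PySem.List.foldl_append_ite_eq_filter (fun c => 96 < c.toNat ∧ c.toNat < 123) w []

-- PySem.Chars.splitOn with the single-char separator [' '] is core List.splitOn ' '
theorem pv_go_space (fuel : Nat) :
    ∀ (l cur : List Char) (accs : List (List Char)), l.length ≤ fuel →
    PySem.Chars.splitOn.go [' '] fuel l cur accs =
      accs.reverse ++ (l.splitOn ' ').modifyHead (cur.reverse ++ ·) := by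
  induction fuel with
  | zero =>
    intro l cur accs h
    have hl : l = [] := List.length_eq_zero_iff.mp (Nat.le_zero.mp h)
    subst hl
    simp [PySem.Chars.splitOn.go, List.splitOn, List.splitOnP_nil]
  | succ f ih =>
    intro l cur accs h
    cases l with
    | nil => simp [PySem.Chars.splitOn.go, List.splitOn, List.splitOnP_nil]
    | cons c rest =>
      obtain ⟨hh, ht, hrest⟩ : ∃ hh ht, rest.splitOnP (· == ' ') = hh :: ht :=
        List.exists_cons_of_ne_nil (List.splitOnP_ne_nil _ rest)
      by_cases hc : c = ' '
      · subst hc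
        have hstep : PySem.Chars.splitOn.go [' '] (f + 1) (' ' :: rest) cur accs =
            PySem.Chars.splitOn.go [' '] f rest [] (cur.reverse :: accs) := by
          simp [PySem.Chars.splitOn.go, List.isPrefixOf]
        rw [hstep, ih rest [] (cur.reverse :: accs) (by simpa using Nat.lt_succ_iff.mp h)]
        simp [List.splitOn, List.splitOnP_cons, hrest]
      · have hp : ([' '] : List Char).isPrefixOf (c :: rest) = false := by
          simp [List.isPrefixOf]
          exact fun h' => hc h'.symm
        have hstep : PySem.Chars.splitOn.go [' '] (f + 1) (c :: rest) cur accs =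
            PySem.Chars.splitOn.go [' '] f rest (c :: cur) accs := by
          simp [PySem.Chars.splitOn.go, hp]
        rw [hstep, ih rest (c :: cur) accs (by simpa using Nat.lt_succ_iff.mp h)]
        simp [List.splitOn, List.splitOnP_cons, hrest, hc]

theorem pv_splitOn_space (l : List Char) :
    PySem.Chars.splitOn l [' '] = l.splitOn ' ' := by
  rw [PySem.Chars.splitOn, pv_go_space (l.length + 1) l [] [] (Nat.le_succ _)]
  obtain ⟨hh, ht, hl⟩ : ∃ hh ht, l.splitOnP (· == ' ') = hh :: ht :=
    List.exists_cons_of_ne_nil (List.splitOnP_ne_nil _ l)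
  simp [List.splitOn, hl]

-- A-side keep + space disjunct = B-side keep, for every char
theorem pv_keep_agree (c : Char) :
    (decide (96 < c.toNat ∧ c.toNat < 123) || decide (c = ' ')) = pvKeepB c := by
  have hn : c.toNat = 32 ↔ c = ' ' := eq_iff_eq_of_cmp_eq_cmp rfl
  rw [Bool.eq_iff_iff]
  simp [pvKeepB, ← hn]
  omega

-- key lemma: filtering each split word and re-appending a space = one flat filter plus a
-- trailing space
theorem pv_key (l : List Char) :
    ((l.splitOn ' ').map
        (fun w => w.filter (fun c => decide (96 < c.toNat ∧ c.toNat < 123)) ++ [' '])).flatten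
      = l.filter pvKeepB ++ [' '] := by
  induction l with
  | nil => simp [List.splitOn, List.splitOnP_nil]
  | cons c rest ih =>
    by_cases hc : c = ' '
    · subst hc
      simp [List.splitOn, List.splitOnP_cons, pvKeepB] at ih ⊢
      exact ih
    · obtain ⟨hh, ht, hrest⟩ : ∃ hh ht, rest.splitOnP (· == ' ') = hh :: ht :=
        List.exists_cons_of_ne_nil (List.splitOnP_ne_nil _ rest)
      have hkeep := pv_keep_agree c
      have hcd : decide (c = ' ') = false := by simp [hc]
      rw [hcd, Bool.or_false] at hkeep
      simp only [List.splitOn, List.splitOnP_cons] at ih ⊢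
      rw [if_neg (by simpa using hc)]
      rw [hrest] at ih ⊢
      simp only [List.modifyHead, List.map_cons, List.flatten_cons, List.filter_cons] at ih ⊢
      rw [hkeep]
      by_cases hk : pvKeepB c = true
      · simp only [hk, if_true, List.cons_append, List.append_assoc] at ih ⊢
        rw [ih]
      · simp only [Bool.not_eq_true] at hk
        simp only [hk, Bool.false_eq_true, if_false, List.append_assoc] at ih ⊢
        exact ih

-- stripping is unaffected by one trailing space
theorem pv_strip_append_space (x : List Char) :
    PySem.Chars.strip (x ++ [' ']) = PySem.Chars.strip x := by
  simp only [PySem.Chars.strip, PySem.Chars.lstrip, List.dropWhile_append]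
  by_cases h : (x.dropWhile PySem.Chars.isspace).isEmpty
  · simp [PySem.Chars.rstrip, List.isEmpty_iff.mp h, PySem.Chars.isspace]
  · simp only [h]
    simp [PySem.Chars.rstrip, PySem.Chars.isspace]

-- the two per-text computations coincide
theorem pv_cleanTextA_eq (text : String) :
    pvCleanTextA text =
      String.ofList (PySem.Chars.strip ((PySem.Chars.lower text.toList).filter pvKeepB)) := by
  simp only [pvCleanTextA]
  rw [PySem.List.foldl_append_eq_flatMap, pv_splitOn_space]
  simp only [List.nil_append, List.flatMap_def]
  simp only [funext fun w => pvCleanWordA_eq_filter w]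
  rw [pv_key, pv_strip_append_space]

-- ===== VERDICT (by name: the statement is the Claim_ definition above) =====
theorem cleanTextData_spec : Claim_equal_cleanTextData := by
  intro textList _
  unfold Spec_cleanTextData cleanTextData cleanTextData_alt
  rw [PySem.List.foldl_append_singleton_eq_map]
  simp [pv_cleanTextA_eq]
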